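-- pv_equiv track=rewrite | github.com/realbigws/DeepSimulator | kmer_model/kmer_simulator.py | repeat_k_time
-- ===== SOURCE A (Python) =====
-- def repeat_k_time(k, result):
--     out = list()
--     ali = list()
--     pos = 0
--     for i in range(len(result)):
--         cur = [result[i]] * k
--         out.extend(cur)
--         for j in range(k):
--             ali.append((pos,i))
--             pos = pos + 1
--     return out,ali
-- ===== SOURCE B (Python) =====
-- def repeat_k_time(k, result):
--     # Staged strided passes: pre-size both tables, then for each offset j
--     # write the whole of `result` (resp. range(n)) into the stride-k slice
--     # starting at j; element i lands at position i*k + j.  Finally pair the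
--     # source indices with their positions via enumerate.
--     n = len(result)
--     total = n * k if k > 0 else 0
--     out = [None] * total
--     src = [None] * total
--     for j in range(k):
--         out[j::k] = result
--         src[j::k] = range(n)
--     return out, list(enumerate(src))
-- ===== Notes on version B (the rewrite author's own statement) =====
-- stated objective: alternative
-- what changed: Instead of A's per-element nested loops with a running pos counter appending one entry at a time, B pre-sizes both tables and fills them by k staged strided passes (out[j::k] = result, src[j::k] = range(n) for each offset j), then forms ali with enumerate(src).
import Mathlib
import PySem

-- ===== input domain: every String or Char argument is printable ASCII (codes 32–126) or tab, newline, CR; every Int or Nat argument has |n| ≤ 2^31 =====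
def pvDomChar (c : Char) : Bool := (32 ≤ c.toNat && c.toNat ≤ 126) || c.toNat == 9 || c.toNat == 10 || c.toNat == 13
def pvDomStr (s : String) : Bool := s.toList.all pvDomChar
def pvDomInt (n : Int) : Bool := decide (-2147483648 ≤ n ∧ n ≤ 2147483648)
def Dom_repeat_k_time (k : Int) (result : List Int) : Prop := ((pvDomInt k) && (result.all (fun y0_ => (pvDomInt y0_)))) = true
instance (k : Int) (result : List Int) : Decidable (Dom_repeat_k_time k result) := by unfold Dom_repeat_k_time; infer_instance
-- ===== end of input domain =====

-- B replaces A's element-by-element nested loops (running `pos` counter) by staged strided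
-- passes: both tables are pre-sized, then for each offset j the whole stride-k slice starting
-- at j is overwritten at once (out[j::k] = result, src[j::k] = range(n)), and ali is
-- enumerate(src).  Objective: alternative decomposition (k slice-writes), same cost.

-- ===== PORT A =====
-- one iteration of A's outer loop body (cur = [result[i]]*k; out.extend; inner j-loop appending (pos,i))
def stepA (m : Nat) (res : List Int) (st : List Int × List (Int × Int) × Int) (i : Nat) :
    List Int × List (Int × Int) × Int :=
  let cur := List.replicate m (res.getD i 0)
  let inner := (List.range m).foldl
      (fun (ap : List (Int × Int) × Int) _ => (ap.1 ++ [(ap.2, (i : Int))], ap.2 + 1))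
      (st.2.1, st.2.2)
  (st.1 ++ cur, inner.1, inner.2)

def repeat_k_time (k : Int) (result : List Int) : List Int × (List (Int × Int)) :=
  -- Python `[x] * k` and `range(k)` are empty for k ≤ 0, hence k.toNat repetitions
  let st := (List.range result.length).foldl (stepA k.toNat result) ([], [], 0)
  (st.1, st.2.1)

-- ===== PORT B =====
-- Python's strided slice assignment `arr[j::k] = vals` (k > 0; lengths match by
-- construction in B, so this positional transcription is exact): vals[t] goes to j + t*k.
def writeStride {α : Type} (arr : List α) (j k : Nat) (vals : List α) : List α :=
  match vals with
  | [] => arr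
  | v :: vs => writeStride (arr.set j v) (j + k) k vs

def repeat_k_time_alt (k : Int) (result : List Int) : List Int × (List (Int × Int)) :=
  let n := result.length
  -- `total = n * k if k > 0 else 0`
  let total := n * k.toNat
  -- `[None] * total`: 0 stands for Python's None placeholder; every slot is overwritten
  -- whenever the j-loop runs (k > 0), and total = 0 otherwise, so no placeholder survives
  let out0 : List Int := List.replicate total 0
  let src0 : List Int := List.replicate total 0
  let st := (PySem.List.pyRange 0 k 1).foldl
      (fun (os : List Int × List Int) j =>
        (writeStride os.1 j.toNat k.toNat result,
         writeStride os.2 j.toNat k.toNat ((List.range n).map Int.ofNat)))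
      (out0, src0)
  (st.1, PySem.List.enumerate st.2 0)

-- ===== PRECONDITION & SPEC =====
def Spec_repeat_k_time (k : Int) (result : List Int) (out : List Int × (List (Int × Int))) : Prop := out = repeat_k_time_alt k result
instance (k : Int) (result : List Int) (out : List Int × (List (Int × Int))) : Decidable (Spec_repeat_k_time k result out) := by unfold Spec_repeat_k_time; infer_instance

-- ===== CLAIM (what is proved, stated in full; the proofs are below) =====
def Claim_equal_repeat_k_time : Prop := ∀ (k : Int) (result : List Int), Dom_repeat_k_time k result → Spec_repeat_k_time k result (repeat_k_time k result)

-- ===== LEMMAS AND PROOFS =====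

-- ---- A's closed form ----

-- A's inner j-loop appends (pos, i), (pos+1, i), … and advances pos by m
lemma innerA (i : Int) (m : Nat) : ∀ (ali : List (Int × Int)) (pos : Int),
    (List.range m).foldl
      (fun (ap : List (Int × Int) × Int) _ => (ap.1 ++ [(ap.2, i)], ap.2 + 1)) (ali, pos)
    = (ali ++ (List.range m).map (fun j => (pos + Int.ofNat j, i)), pos + (m : Int)) := by
  induction m with
  | zero => simp
  | succ m ih =>
      intro ali pos
      rw [List.range_succ, List.foldl_append, ih]
      simp only [List.foldl, List.map_append, List.map_cons, List.map_nil, List.append_assoc]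
      refine Prod.ext ?_ ?_
      · simp
      · push_cast; ring

-- invariant of A's outer loop after n iterations
lemma outerA (m : Nat) (res : List Int) : ∀ n, n ≤ res.length →
    (List.range n).foldl (stepA m res) ([], [], 0)
    = ((res.take n).flatMap (fun x => List.replicate m x),
       (List.range (n * m)).map (fun p => (Int.ofNat p, Int.ofNat (p / m))),
       ((n * m : Nat) : Int)) := by
  intro n
  induction n with
  | zero => simp
  | succ n ih =>
      intro hle
      have hn : n < res.length := by omega
      rw [List.range_succ, List.foldl_append, ih (by omega)]
      simp only [List.foldl, stepA, innerA]
      simp only [Prod.mk.injEq]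
      refine ⟨?_, ?_, ?_⟩
      · have hts : res.take (n + 1) = res.take n ++ [res.getD n 0] := by
          rw [List.take_add_one, List.getElem?_eq_getElem hn, List.getD_eq_getElem res 0 hn]
          rfl
        rw [hts, List.flatMap_append, List.flatMap_cons, List.flatMap_nil, List.append_nil]
      · have hr : (n + 1) * m = n * m + m := by ring
        rw [hr, List.range_add, List.map_append, List.map_map]
        congr 1
        apply List.map_congr_left
        intro j hj
        have hjm : j < m := List.mem_range.mp hj
        have hdiv : (n * m + j) / m = n := by
          have hm : 0 < m := by omega
          rw [Nat.add_comm, Nat.add_mul_div_right j n hm, Nat.div_eq_of_lt hjm]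
          omega
        simp only [Function.comp, hdiv, Prod.mk.injEq]
        constructor
        · simp only [Int.ofNat_eq_natCast]; push_cast; ring
        · simp
      · push_cast; ring

lemma foldl_id_of_fixed {α β : Type} (f : α → β → α) (h : ∀ s b, f s b = s) :
    ∀ (l : List β) (init : α), l.foldl f init = init := by
  intro l
  induction l with
  | nil => intro init; rfl
  | cons b t ih => intro init; rw [List.foldl_cons, h]; exact ih init

-- k ≤ 0: A's loops do nothing
lemma A_nonpos (k : Int) (res : List Int) (hk : k ≤ 0) : repeat_k_time k res = ([], []) := by
  have hm : k.toNat = 0 := Int.toNat_of_nonpos hk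
  unfold repeat_k_time
  rw [foldl_id_of_fixed]
  intro st i
  simp [stepA, hm]

-- ---- B's strided writes ----

lemma writeStride_length {α : Type} : ∀ (vals arr : List α) (j k : Nat),
    (writeStride arr j k vals).length = arr.length := by
  intro vals
  induction vals with
  | nil => intro arr j k; rfl
  | cons v vs ih => intro arr j k; rw [writeStride, ih, List.length_set]

-- value at slot p after one strided write, when every written slot is in range
lemma writeStride_getD {α : Type} (d : α) : ∀ (vals arr : List α) (j k p : Nat), 0 < k →
    (∀ t, t < vals.length → j + t * k < arr.length) →
    (writeStride arr j k vals).getD p d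
    = if j ≤ p ∧ (p - j) % k = 0 ∧ (p - j) / k < vals.length
      then vals.getD ((p - j) / k) d else arr.getD p d := by
  intro vals
  induction vals with
  | nil =>
      intro arr j k p hk _
      simp [writeStride]
  | cons v vs ih =>
      intro arr j k p hk hin
      have hin' : ∀ t, t < vs.length → (j + k) + t * k < (arr.set j v).length := by
        intro t ht
        rw [List.length_set]
        have h1 := hin (t + 1) (by simpa using Nat.succ_lt_succ ht)
        have h2 : (t + 1) * k = t * k + k := by ring
        omega
      rw [writeStride, ih _ _ _ _ hk hin']
      by_cases hpj : p = j
      · subst hpj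
        have hlt : p < arr.length := by
          have := hin 0 (by simp)
          omega
        rw [if_neg (by omega), if_pos ⟨le_refl p, by simp, by simp⟩]
        simp [List.getD_eq_getElem?_getD, hlt]
      · by_cases hge : j + k ≤ p
        · have hsub : p - j = (p - (j + k)) + k := by omega
          have hmod : (p - j) % k = (p - (j + k)) % k := by
            rw [hsub, Nat.add_mod_right]
          have hdivv : (p - j) / k = (p - (j + k)) / k + 1 := by
            rw [hsub, Nat.add_div_right _ hk]
          by_cases hc : (j + k) ≤ p ∧ (p - (j + k)) % k = 0 ∧ (p - (j + k)) / k < vs.length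
          · have hlc : (v :: vs).length = vs.length + 1 := rfl
            rw [if_pos hc,
              if_pos ⟨by omega, by rw [hmod]; exact hc.2.1, by rw [hdivv]; omega⟩, hdivv]
            rfl
          · rw [if_neg hc, if_neg ?_,
              (by simp [List.getD_eq_getElem?_getD, List.getElem?_set_ne (fun h => hpj h.symm)] :
                (arr.set j v).getD p d = arr.getD p d)]
            intro ⟨h1, h2, h3⟩
            have hlc : (v :: vs).length = vs.length + 1 := rfl
            exact hc ⟨hge, by rw [← hmod]; exact h2, by omega⟩
        · rw [if_neg (by omega), if_neg ?_,
            (by simp [List.getD_eq_getElem?_getD, List.getElem?_set_ne (fun h => hpj h.symm)] :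
              (arr.set j v).getD p d = arr.getD p d)]
          intro ⟨h1, h2, h3⟩
          have hlt : p - j < k := by omega
          rw [Nat.mod_eq_of_lt hlt] at h2
          omega

-- the write-condition of slice j is exactly "p lives in residue class j"
lemma stride_cond_iff (m J p L : Nat) (hm : 0 < m) (hJ : J < m) (hp : p < L * m) :
    (J ≤ p ∧ (p - J) % m = 0 ∧ (p - J) / m < L) ↔ p % m = J := by
  constructor
  · rintro ⟨h1, h2, _⟩
    obtain ⟨c, hcc⟩ := Nat.dvd_of_mod_eq_zero h2
    have hmc : m * c = c * m := Nat.mul_comm m c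
    have hpe : p = J + c * m := by omega
    rw [hpe, Nat.add_mul_mod_self_right, Nat.mod_eq_of_lt hJ]
  · intro hpm
    have hdm := Nat.div_add_mod p m
    refine ⟨by omega, ?_, ?_⟩
    · have : p - J = m * (p / m) := by omega
      rw [this, Nat.mul_mod_right]
    · have h1 : p - J = m * (p / m) := by omega
      rw [h1, Nat.mul_div_cancel_left _ hm]
      exact (Nat.div_lt_iff_lt_mul hm).mpr hp

lemma stride_div (m J p : Nat) (hm : 0 < m) (hpm : p % m = J) :
    (p - J) / m = p / m := by
  have hdm := Nat.div_add_mod p m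
  have h1 : p - J = m * (p / m) := by omega
  rw [h1, Nat.mul_div_cancel_left _ hm]

-- the j-fold of strided writes, characterised slot by slot
lemma fold_stride {α : Type} (m : Nat) (hm : 0 < m) (vals : List α) (d : α) :
    ∀ J, J ≤ m →
    ((List.range J).foldl (fun a j => writeStride a j m vals)
        (List.replicate (vals.length * m) d)).length = vals.length * m ∧
    ∀ p, p < vals.length * m →
      ((List.range J).foldl (fun a j => writeStride a j m vals)
          (List.replicate (vals.length * m) d)).getD p d
      = if p % m < J then vals.getD (p / m) d else d := by
  intro J
  induction J with
  | zero =>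
      intro _
      exact ⟨by simp, fun p hp => by simp⟩
  | succ J ih =>
      intro _hJ
      obtain ⟨ihlen, ihval⟩ := ih (by omega)
      rw [List.range_succ, List.foldl_append, List.foldl_cons, List.foldl_nil]
      refine ⟨by rw [writeStride_length, ihlen], ?_⟩
      intro p hp
      rw [writeStride_getD d _ _ _ _ _ hm ?_]
      · by_cases hpm : p % m = J
        · rw [if_pos ((stride_cond_iff m J p vals.length hm (by omega) hp).mpr hpm),
            stride_div m J p hm hpm, if_pos (by omega)]
        · rw [if_neg (fun hc => hpm ((stride_cond_iff m J p vals.length hm (by omega) hp).mp hc)),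
            ihval p hp]
          have : (p % m < J + 1) ↔ (p % m < J) := by omega
          simp only [this]
      · intro t ht
        rw [ihlen]
        calc J + t * m < m + t * m := by omega
          _ = (t + 1) * m := by ring
          _ ≤ vals.length * m := Nat.mul_le_mul_right m (by omega)

-- after all m passes the table reads vals[p / m] at slot p
lemma fold_stride_full {α : Type} (m : Nat) (hm : 0 < m) (vals : List α) (d : α) :
    (List.range m).foldl (fun a j => writeStride a j m vals)
        (List.replicate (vals.length * m) d)
    = (List.range (vals.length * m)).map (fun p => vals.getD (p / m) d) := by
  obtain ⟨hlen, hval⟩ := fold_stride m hm vals d m (le_refl m)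
  apply List.ext_getElem
  · simp [hlen]
  · intro p h1 h2
    have hp : p < vals.length * m := by simpa [hlen] using h1
    have := hval p hp
    rw [List.getD_eq_getElem?_getD, List.getElem?_eq_getElem h1] at this
    simp only [Option.getD_some] at this
    rw [this, if_pos (Nat.mod_lt p hm)]
    simp

-- B's Int-valued fold over pyRange reduced to the Nat-indexed fold
lemma pyRange_fold_stride (m : Nat) (A B vals1 vals2 : List Int) :
    (PySem.List.pyRange 0 (m : Int) 1).foldl
      (fun (os : List Int × List Int) j =>
        (writeStride os.1 j.toNat m vals1, writeStride os.2 j.toNat m vals2)) (A, B)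
    = ((List.range m).foldl (fun a j => writeStride a j m vals1) A,
       (List.range m).foldl (fun a j => writeStride a j m vals2) B) := by
  rw [PySem.List.pyRange_one, List.foldl_map,
    PySem.List.foldl_prod_mk (f := fun a (j : Nat) => writeStride a (((0:Int) + j).toNat) m vals1)
      (g := fun a (j : Nat) => writeStride a (((0:Int) + j).toNat) m vals2)]
  simp

-- enumerate of a range-map list, as a single map
lemma enumerate_map_range (N : Nat) (f : Nat → Int) :
    PySem.List.enumerate ((List.range N).map f) 0
    = (List.range N).map (fun p => (Int.ofNat p, f p)) := by
  apply List.ext_getElem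
  · simp [PySem.List.length_enumerate]
  · intro p h1 h2
    have hp : p < N := by simpa [PySem.List.length_enumerate] using h1
    rw [PySem.List.getElem_enumerate]
    simp [List.getElem_map, List.getElem_range]

-- repeating each element m times is reading slot p / m of the source
lemma flatMap_replicate_eq_map_range (m : Nat) (hm : 0 < m) (res : List Int) :
    res.flatMap (fun x => List.replicate m x)
    = (List.range (res.length * m)).map (fun p => res.getD (p / m) 0) := by
  induction res using List.reverseRecOn with
  | nil => simp
  | append_singleton res x ih =>
      rw [List.flatMap_append, ih, List.flatMap_cons, List.flatMap_nil, List.append_nil]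
      have hr : (res ++ [x]).length * m = res.length * m + m := by simp [List.length_append]; ring
      rw [hr, List.range_add, List.map_append, List.map_map]
      congr 1
      · apply List.map_congr_left
        intro p hp
        have hplt : p < res.length * m := List.mem_range.mp hp
        have hdl : p / m < res.length := (Nat.div_lt_iff_lt_mul hm).mpr hplt
        rw [List.getD_eq_getElem?_getD, List.getD_eq_getElem?_getD,
          List.getElem?_append_left hdl]
      · apply List.ext_getElem
        · simp
        · intro p h1 h2
          have hpm : p < m := by simpa using h1
          have hdiv : (res.length * m + p) / m = res.length := by
            rw [Nat.mul_comm, Nat.mul_add_div hm, Nat.div_eq_of_lt hpm]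
            omega
          simp [Function.comp, hdiv]

-- k ≤ 0: B builds empty tables
lemma B_nonpos (k : Int) (res : List Int) (hk : k ≤ 0) : repeat_k_time_alt k res = ([], []) := by
  have hm : k.toNat = 0 := Int.toNat_of_nonpos hk
  have h1 : PySem.List.pyRange 0 k 1 = [] := PySem.List.pyRange_one_eq_nil hk
  simp [repeat_k_time_alt, hm, h1, PySem.List.enumerate_nil]

-- k > 0: B's tables in closed form
lemma B_pos (k : Int) (res : List Int) (hk : 0 < k) :
    repeat_k_time_alt k res
    = ((List.range (res.length * k.toNat)).map (fun p => res.getD (p / k.toNat) 0),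
       (List.range (res.length * k.toNat)).map
         (fun p => (Int.ofNat p, Int.ofNat (p / k.toNat)))) := by
  obtain ⟨m, rfl⟩ : ∃ m : Nat, k = ((m : Nat) : Int) := ⟨k.toNat, by omega⟩
  have hm : 0 < m := by exact_mod_cast hk
  have htn : ((m : Int)).toNat = m := Int.toNat_natCast m
  unfold repeat_k_time_alt
  simp only [htn]
  rw [pyRange_fold_stride, fold_stride_full m hm res 0]
  have hlen2 : ((List.range res.length).map Int.ofNat).length = res.length := by simp
  rw [(by rw [hlen2] : List.replicate (res.length * m) (0:Int)
        = List.replicate (((List.range res.length).map Int.ofNat).length * m) (0:Int)),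
    fold_stride_full m hm ((List.range res.length).map Int.ofNat) 0, hlen2, enumerate_map_range]
  refine Prod.ext rfl ?_
  simp only
  apply List.map_congr_left
  intro p hp
  have hplt : p < res.length * m := List.mem_range.mp hp
  have hd : p / m < res.length := (Nat.div_lt_iff_lt_mul hm).mpr hplt
  simp [List.getD_eq_getElem?_getD, hd]

-- ===== VERDICT (by name: the statement is the Claim_ definition above) =====
theorem repeat_k_time_spec : Claim_equal_repeat_k_time := by
  intro k result _
  unfold Spec_repeat_k_time
  by_cases hk : k ≤ 0
  · rw [A_nonpos k result hk, B_nonpos k result hk]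
  · have hkpos : 0 < k := by omega
    have hm : 0 < k.toNat := by omega
    rw [B_pos k result hkpos]
    unfold repeat_k_time
    rw [outerA k.toNat result result.length (le_refl _)]
    simp only [List.take_length]
    exact Prod.ext (flatMap_replicate_eq_map_range k.toNat hm result) rfl
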